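-- pv_equiv track=rewrite | github.com/brendanxwhitaker/telephone | telephone/all_wordifications.py | get_country_code_and_base
-- ===== SOURCE A (Python) =====
-- import itertools
-- from typing import Set, Dict, List, Tuple
--
-- VALID_CHARACTERS = set(list(" -0123456789"))
--
-- FUNCTION_CHARACTERS = set(list("-"))
--
-- def get_country_code_and_base(number: str) -> Tuple[str, str]:
--     """
--     Determines if a string COULD be a valid phone number according to a general format.
--
--     Parameters
--     ----------
--     number : ``str``.
--         A valid US phone number with country code and dashes. Note that this check is
--         intended to be a redundancy only.
--
--     Returns
--     -------
--     sanitized_number : ``str``.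
--         The input but without whitespace or anything except numerals.
--
--     Raises
--     ------
--     ValueError.
--         If the input contains invalid characters or sequences.
--     """
--
--     # Strip whitespace.
--     stripped_number = "".join(number.split())
--
--     # Check for invalid characters.
--     for char in FUNCTION_CHARACTERS:
--         sanitized_number = stripped_number.replace(char, "")
--     if not sanitized_number.isnumeric():
--         raise ValueError(
--             "The number '%s' contains invalid characters. " % number
--             + "Only characters from the set '%s' are allowed." % str(VALID_CHARACTERS)
--         )
--
--     # Check for invalid arrangements of function characters.
--     fn_combs = itertools.combinations_with_replacement(FUNCTION_CHARACTERS, 2)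
--     fn_strs = ["".join(comb) for comb in fn_combs]
--     for fn_str in fn_strs:
--         if fn_str in stripped_number:
--             raise ValueError(
--                 "Invalid arrangement '%s' of function characters from '%s' in '%s'."
--                 % (fn_str, str(FUNCTION_CHARACTERS), stripped_number)
--             )
--
--     segments = stripped_number.split("-")
--     country_code = segments[0]
--     base_number = "".join(segments[1:])
--
--     return country_code, base_number
-- ===== SOURCE B (Python) =====
-- def get_country_code_and_base(number: str) -> tuple:
--     """Single stateful scan over the whitespace-stripped string instead of
--     separate replace/isnumeric/substring-search/split passes."""
--     stripped = "".join(number.split())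
--
--     segments = []
--     cur = ""
--     prev_dash = False
--     seen_digit = False
--     for c in stripped:
--         if c == "-":
--             if prev_dash:
--                 raise ValueError(
--                     "Invalid arrangement '--' of function characters in '%s'."
--                     % stripped
--                 )
--             segments.append(cur)
--             cur = ""
--             prev_dash = True
--         else:
--             if not c.isnumeric():
--                 raise ValueError(
--                     "The number '%s' contains invalid characters." % number
--                 )
--             cur += c
--             prev_dash = False
--             seen_digit = True
--     if not seen_digit:
--         raise ValueError(
--             "The number '%s' contains invalid characters." % number
--         )
--     segments.append(cur)
--
--     return segments[0], "".join(segments[1:])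
-- ===== Notes on version B (the rewrite author's own statement) =====
-- stated objective: alternative
-- what changed: Replaces A's four separate passes (replace, isnumeric, dash-pair substring search, split+join) by one stateful left-to-right scan that validates characters, detects adjacent dashes via a previous-dash flag, and accumulates the dash-separated segments as it goes.
import Mathlib
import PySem

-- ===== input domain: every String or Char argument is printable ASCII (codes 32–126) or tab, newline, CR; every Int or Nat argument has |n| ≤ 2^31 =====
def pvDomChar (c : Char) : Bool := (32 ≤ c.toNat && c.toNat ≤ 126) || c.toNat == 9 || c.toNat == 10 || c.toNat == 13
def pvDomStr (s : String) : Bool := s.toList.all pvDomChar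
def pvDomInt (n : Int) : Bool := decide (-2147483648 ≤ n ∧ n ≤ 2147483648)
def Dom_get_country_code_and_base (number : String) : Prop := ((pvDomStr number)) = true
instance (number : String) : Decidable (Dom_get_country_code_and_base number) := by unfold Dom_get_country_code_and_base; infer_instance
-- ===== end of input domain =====

-- B replaces A's separate replace/isnumeric/substring/split passes with one stateful scan; return values proved equal on Pre_ (A raises ValueError outside Pre_).


-- ===== PORT A =====
-- isnumeric agrees with PySem.Chars.strIsdigit on the ASCII domain (no non-ASCII numerals there).
def get_country_code_and_base (number : String) : String × String :=
  let stripped := PySem.Chars.join [] (PySem.Chars.split₀ number.toList)   -- "".join(number.split())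
  let sanitized := PySem.Chars.replace stripped ['-'] []                   -- stripped.replace('-','') (the single FUNCTION_CHARACTERS loop body)
  if PySem.Chars.strIsdigit sanitized = false then ("", "")                -- raise ValueError (outside Pre_)
  else if PySem.Chars.isIn ['-', '-'] stripped then ("", "")               -- raise ValueError for adjacent dashes (outside Pre_)
  else
    let segments := PySem.Chars.splitOn stripped ['-']                     -- stripped.split('-')
    (String.ofList (PySem.List.pyGetD segments 0 []),                          -- segments[0]
     String.ofList (PySem.Chars.join [] (segments.drop 1)))                    -- "".join(segments[1:])

-- ===== PORT B =====
-- the single scan of Source B: state = (completed segments, current segment, previous-char-was-dash, seen a digit);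
-- none = the ValueError raises of Source B; isnumeric per char agrees with PySem.Chars.isdigit on the ASCII domain.
def pvScan : List Char → List (List Char) → List Char → Bool → Bool → Option (List (List Char))
  | [], segs, cur, _, seenDigit => if seenDigit then some (segs ++ [cur]) else none
  | c :: rest, segs, cur, prevDash, seenDigit =>
    if c = '-' then
      if prevDash then none
      else pvScan rest (segs ++ [cur]) [] true seenDigit
    else if PySem.Chars.isdigit c then pvScan rest segs (cur ++ [c]) false true
    else none

def get_country_code_and_base_alt (number : String) : String × String :=
  let stripped := PySem.Chars.join [] (PySem.Chars.split₀ number.toList)   -- "".join(number.split())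
  match pvScan stripped [] [] false false with
  | none => ("", "")                                                       -- raise ValueError (outside Pre_)
  | some segs => (String.ofList (segs.headD []), String.ofList (segs.drop 1).flatten)

-- ===== PRECONDITION & SPEC =====
-- Pre_ admits exactly the inputs on which A returns: after removing whitespace every character is a
-- dash or a digit, at least one digit occurs, and no two dashes are adjacent (A raises ValueError otherwise).
def Pre_get_country_code_and_base (number : String) : Prop :=
  (number.toList.filter (fun c => !PySem.Chars.isspace c)).all
      (fun c => c == '-' || PySem.Chars.isdigit c) = true ∧
  (number.toList.filter (fun c => !PySem.Chars.isspace c)).any PySem.Chars.isdigit = true ∧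
  ¬ ['-', '-'] <:+: number.toList.filter (fun c => !PySem.Chars.isspace c)
instance (number : String) : Decidable (Pre_get_country_code_and_base number) := by
  unfold Pre_get_country_code_and_base; infer_instance
def pvWitness_get_country_code_and_base : String := "1-2"

def Spec_get_country_code_and_base (number : String) (out : String × String) : Prop := out = get_country_code_and_base_alt number
instance (number : String) (out : String × String) : Decidable (Spec_get_country_code_and_base number out) := by unfold Spec_get_country_code_and_base; infer_instance

-- ===== CLAIM (what is proved, stated in full; the proofs are below) =====
def Claim_equal_get_country_code_and_base : Prop := ∀ (number : String), Dom_get_country_code_and_base number → Pre_get_country_code_and_base number → Spec_get_country_code_and_base number (get_country_code_and_base number)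

-- ===== LEMMAS AND PROOFS =====

-- "".join with empty separator is concatenation
theorem pv_intercalate_nil (xs : List (List Char)) :
    ([] : List Char).intercalate xs = xs.flatten := by
  induction xs with
  | nil => simp [List.intercalate]
  | cons h t ih => cases t <;> simp_all [List.intercalate, List.intersperse]

-- "".join(s.split()) is s with the whitespace removed
theorem pv_join_split₀_go (l : List Char) : ∀ (cur : List Char) (acc : List (List Char)),
    (PySem.Chars.split₀.go l cur acc).flatten
      = acc.reverse.flatten ++ cur.reverse ++ l.filter (fun c => !PySem.Chars.isspace c) := by
  induction l with
  | nil =>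
    intro cur acc
    simp [PySem.Chars.split₀.go]
    by_cases h : cur = [] <;> simp [h]
  | cons c rest ih =>
    intro cur acc
    rw [PySem.Chars.split₀.go]
    by_cases hs : PySem.Chars.isspace c
    · by_cases hc : cur = [] <;> simp [hs, hc, ih]
    · simp [hs, ih]

theorem pv_join_split₀ (l : List Char) :
    PySem.Chars.join [] (PySem.Chars.split₀ l) = l.filter (fun c => !PySem.Chars.isspace c) := by
  rw [show PySem.Chars.join [] (PySem.Chars.split₀ l) = (PySem.Chars.split₀ l).flatten from
        pv_intercalate_nil _, PySem.Chars.split₀, pv_join_split₀_go]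
  simp

def pvSplit : List Char → List (List Char)
  | [] => [[]]
  | c :: t => if c = '-' then [] :: pvSplit t else (pvSplit t).modifyHead (c :: ·)

theorem pvSplit_ne_nil (l : List Char) : pvSplit l ≠ [] := by
  cases l with
  | nil => simp [pvSplit]
  | cons c t =>
    simp only [pvSplit]
    split
    · simp
    · exact fun h => (pvSplit_ne_nil t) (by simpa using List.modifyHead_eq_nil_iff.mp h)

theorem pv_splitOn_go (l : List Char) : ∀ (cur : List Char) (acc : List (List Char)) (fuel : Nat),
    l.length ≤ fuel →
    PySem.Chars.splitOn.go ['-'] fuel l cur acc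
      = acc.reverse ++ (pvSplit l).modifyHead (cur.reverse ++ ·) := by
  induction l with
  | nil =>
    intro cur acc fuel _
    cases fuel <;> simp [PySem.Chars.splitOn.go, pvSplit]
  | cons c rest ih =>
    intro cur acc fuel hf
    cases fuel with
    | zero => simp at hf
    | succ f =>
      rw [PySem.Chars.splitOn.go]
      by_cases hc : c = '-'
      · subst hc
        rw [if_pos (by simp [List.isPrefixOf] : ['-'].isPrefixOf ('-'::rest) = true)]
        rw [show List.drop (['-'].length) ('-'::rest) = rest from rfl]
        rw [ih [] (cur.reverse :: acc) f (by simpa using hf)]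
        simp [pvSplit]
        cases pvSplit rest <;> simp
      · rw [if_neg (by simp [List.isPrefixOf, Ne.symm hc] : ¬ ['-'].isPrefixOf (c::rest) = true)]
        rw [ih (c :: cur) acc f (by simpa using Nat.le_of_succ_le_succ hf)]
        simp [pvSplit, hc, List.modifyHead_modifyHead, Function.comp_def]

theorem pv_replace_go (l : List Char) : ∀ (acc : List Char) (fuel : Nat),
    l.length ≤ fuel →
    PySem.Chars.replace.go ['-'] [] fuel l acc
      = acc.reverse ++ l.filter (fun c => !(c = '-')) := by
  induction l with
  | nil => intro acc fuel _; cases fuel <;> simp [PySem.Chars.replace.go]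
  | cons c rest ih =>
    intro acc fuel hf
    cases fuel with
    | zero => simp at hf
    | succ f =>
      rw [PySem.Chars.replace.go]
      by_cases hc : c = '-'
      · subst hc
        rw [if_pos (by simp [List.isPrefixOf] : ['-'].isPrefixOf ('-'::rest) = true)]
        rw [show List.drop (['-'].length) ('-'::rest) = rest from rfl,
            show ([] : List Char).reverse ++ acc = acc from rfl]
        rw [ih acc f (by simpa using hf)]
        simp
      · rw [if_neg (by simp [List.isPrefixOf, Ne.symm hc] : ¬ ['-'].isPrefixOf (c::rest) = true)]
        rw [ih (c :: acc) f (by simpa using Nat.le_of_succ_le_succ hf)]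
        simp [hc]

theorem pv_scan_eq (l : List Char) : ∀ (segs : List (List Char)) (cur : List Char)
    (prevDash seenDigit : Bool),
    (∀ c ∈ l, c = '-' ∨ PySem.Chars.isdigit c = true) →
    (seenDigit = true ∨ ∃ c ∈ l, PySem.Chars.isdigit c = true) →
    ¬ ['-', '-'] <:+: l →
    (prevDash = true → ∀ t, l ≠ '-' :: t) →
    pvScan l segs cur prevDash seenDigit
      = some (segs ++ (pvSplit l).modifyHead (cur ++ ·)) := by
  induction l with
  | nil =>
    intro segs cur prevDash seenDigit _ hdig _ _
    rcases hdig with h | ⟨c, hc, _⟩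
    · simp [pvScan, pvSplit, h]
    · simp at hc
  | cons c rest ih =>
    intro segs cur prevDash seenDigit hchars hdig hadj hprev
    by_cases hc : c = '-'
    · subst hc
      have hpd : prevDash = false := by
        cases h : prevDash
        · rfl
        · exact absurd rfl (hprev h rest)
      rw [pvScan, if_pos rfl, hpd, if_neg (by simp)]
      rw [ih (segs ++ [cur]) [] true seenDigit
        (fun d hd => hchars d (List.mem_cons_of_mem _ hd))
        (by rcases hdig with h | ⟨d, hd, hdig'⟩
            · exact Or.inl h
            · rcases List.mem_cons.mp hd with rfl | hd'
              · simp [PySem.Chars.isdigit] at hdig'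
              · exact Or.inr ⟨d, hd', hdig'⟩)
        (fun h => hadj (h.trans (List.suffix_cons _ _).isInfix))
        (by intro _ t ht
            subst ht
            exact hadj ⟨[], t, by simp⟩)]
      simp [pvSplit]
      cases pvSplit rest <;> simp
    · have hd : PySem.Chars.isdigit c = true := by
        rcases hchars c List.mem_cons_self with h | h
        · exact absurd h hc
        · exact h
      rw [pvScan, if_neg hc, if_pos hd]
      rw [ih segs (cur ++ [c]) false true
        (fun d hd' => hchars d (List.mem_cons_of_mem _ hd'))
        (Or.inl rfl)
        (fun h => hadj (h.trans (List.suffix_cons _ _).isInfix))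
        (by simp)]
      simp [pvSplit, hc, List.modifyHead_modifyHead, Function.comp_def]

-- main assembly
theorem pv_main (number : String)
    (hpre : Pre_get_country_code_and_base number) :
    get_country_code_and_base number = get_country_code_and_base_alt number := by
  obtain ⟨hchars', hdig', hadj⟩ := hpre
  set s := number.toList.filter (fun c => !PySem.Chars.isspace c) with hs
  have hchars : ∀ c ∈ s, c = '-' ∨ PySem.Chars.isdigit c = true := by
    intro c hc
    simpa using List.all_eq_true.mp hchars' c hc
  have hdig : ∃ c ∈ s, PySem.Chars.isdigit c = true := List.any_eq_true.mp hdig'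
  have hstripped : PySem.Chars.join [] (PySem.Chars.split₀ number.toList) = s :=
    pv_join_split₀ number.toList
  -- sanitized is a nonempty all-digit string
  have hsan : PySem.Chars.replace s ['-'] [] = s.filter (fun c => !(c = '-')) := by
    rw [PySem.Chars.replace]
    rw [if_neg (by simp : ¬ ((['-'] : List Char).isEmpty = true))]
    exact pv_replace_go s [] s.length le_rfl
  have hdigit_guard : PySem.Chars.strIsdigit (PySem.Chars.replace s ['-'] []) = true := by
    rw [hsan, PySem.Chars.strIsdigit]
    obtain ⟨d, hd, hdd⟩ := hdig
    have hdne : ¬ d = '-' := by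
      intro h; subst h; simp [PySem.Chars.isdigit] at hdd
    refine Bool.and_eq_true_iff.mpr ⟨?_, ?_⟩
    · have hmem : d ∈ s.filter (fun c => !decide (c = '-')) :=
        List.mem_filter.mpr ⟨hd, by simpa using hdne⟩
      simp [List.ne_nil_of_mem hmem]
    · refine List.all_eq_true.mpr ?_
      intro c hc
      have hc' := List.mem_filter.mp hc
      rcases hchars c hc'.1 with h | h
      · simp [h] at hc'
      · exact h
  have hisin : PySem.Chars.isIn ['-', '-'] s = false :=
    (PySem.Chars.isIn_eq_false_iff _ _).mpr hadj
  have hsegs : PySem.Chars.splitOn s ['-'] = pvSplit s := by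
    rw [PySem.Chars.splitOn, pv_splitOn_go s [] [] (s.length + 1) (Nat.le_succ _)]
    cases pvSplit s <;> simp
  have hscan : pvScan s [] [] false false = some (pvSplit s) := by
    rw [pv_scan_eq s [] [] false false hchars (Or.inr hdig) hadj (by simp)]
    cases pvSplit s <;> simp
  rw [get_country_code_and_base, get_country_code_and_base_alt]
  simp only [hstripped, hdigit_guard, hisin, hsegs, hscan, Bool.false_eq_true, if_false,
    Bool.true_eq_false]
  cases h : pvSplit s with
  | nil => exact absurd h (pvSplit_ne_nil s)
  | cons a b =>
    simp [PySem.List.pyGetD_zero_cons, pv_intercalate_nil, PySem.Chars.join]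

-- ===== VERDICT (by name: the statement is the Claim_ definition above) =====
theorem get_country_code_and_base_spec : Claim_equal_get_country_code_and_base := by
  intro number _ hpre
  unfold Spec_get_country_code_and_base
  exact pv_main number hpre
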